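-- pv_equiv track=rewrite | github.com/RahulSGosavi/test-interiorr-ai | backend/pricing_processor.py | _select_sheet
-- ===== SOURCE A (Python) =====
-- from typing import Dict, Any, List, Optional, Tuple
--
-- def _select_sheet(sheets: List[str]) -> str:
--     """Select best sheet for pricing data."""
--     for s in sheets:
--         sl = s.lower()
--         if 'sku' in sl and 'pricing' in sl and 'accessory' not in sl:
--             return s
--     for s in sheets:
--         if 'pricing' in s.lower() and 'accessory' not in s.lower():
--             return s
--     return sheets[0] if sheets else "Sheet1"
-- ===== SOURCE B (Python) =====
-- def _select_sheet(sheets):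
--     """Select best sheet for pricing data."""
--     if not sheets:
--         return "Sheet1"
--
--     def tier(s):
--         sl = s.lower()
--         if 'accessory' in sl or 'pricing' not in sl:
--             return 2
--         return 0 if 'sku' in sl else 1
--
--     return min(enumerate(sheets), key=lambda t: (tier(t[1]), t[0]))[1]
-- ===== Notes on version B (the rewrite author's own statement) =====
-- stated objective: alternative
-- what changed: Replaces A's two ordered scans (first for sku+pricing sheets, then for pricing sheets) by a tier function and a single min over enumerate(sheets) keyed by (tier, index), with an explicit empty-list fallback to 'Sheet1'.
import Mathlib
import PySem

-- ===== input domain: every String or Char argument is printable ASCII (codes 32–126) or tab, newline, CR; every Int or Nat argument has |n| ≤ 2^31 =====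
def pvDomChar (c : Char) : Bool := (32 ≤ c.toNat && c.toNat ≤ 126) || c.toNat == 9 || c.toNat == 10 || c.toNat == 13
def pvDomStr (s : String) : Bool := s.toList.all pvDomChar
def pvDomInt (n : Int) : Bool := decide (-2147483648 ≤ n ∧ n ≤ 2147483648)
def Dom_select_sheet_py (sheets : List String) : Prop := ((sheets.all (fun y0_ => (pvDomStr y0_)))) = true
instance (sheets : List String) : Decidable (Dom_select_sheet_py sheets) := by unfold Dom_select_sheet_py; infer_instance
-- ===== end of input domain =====

-- B replaces A's two ordered scans by a single pass choosing the sheet minimizing (tier, index); same return value.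
-- ===== PORT A =====
-- first-loop condition: 'sku' in sl and 'pricing' in sl and 'accessory' not in sl  (sl = s.lower())
def pvCondA (s : String) : Bool :=
  PySem.Str.isIn "sku" (PySem.Str.lower s) && PySem.Str.isIn "pricing" (PySem.Str.lower s) &&
    !PySem.Str.isIn "accessory" (PySem.Str.lower s)
-- second-loop condition: 'pricing' in s.lower() and 'accessory' not in s.lower()
def pvCondB (s : String) : Bool :=
  PySem.Str.isIn "pricing" (PySem.Str.lower s) && !PySem.Str.isIn "accessory" (PySem.Str.lower s)

def select_sheet_py (sheets : List String) : String :=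
  match sheets.find? pvCondA with            -- first for-loop with early return
  | some s => s
  | none =>
    match sheets.find? pvCondB with          -- second for-loop with early return
    | some s => s
    | none =>
      match sheets with                      -- sheets[0] if sheets else "Sheet1"
      | [] => "Sheet1"
      | s :: _ => s

-- ===== PORT B =====
-- tier(s) from Source B
def pvTier (s : String) : Int :=
  if PySem.Str.isIn "accessory" (PySem.Str.lower s) || !PySem.Str.isIn "pricing" (PySem.Str.lower s) then 2
  else if PySem.Str.isIn "sku" (PySem.Str.lower s) then 0 else 1

-- one step of Python's min over enumerate(sheets) with key (tier s, i): state = (cached tier, index, sheet)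
def pvStep (b : Int × Int × String) (p : Int × String) : Int × Int × String :=
  if pvTier p.2 < b.1 || (pvTier p.2 == b.1 && p.1 < b.2.1) then (pvTier p.2, p.1, p.2) else b

def select_sheet_py_alt (sheets : List String) : String :=
  match sheets with
  | [] => "Sheet1"
  | s :: rest => ((PySem.List.enumerate rest 1).foldl pvStep (pvTier s, 0, s)).2.2

-- ===== PRECONDITION & SPEC =====
def Spec_select_sheet_py (sheets : List String) (out : String) : Prop := out = select_sheet_py_alt sheets
instance (sheets : List String) (out : String) : Decidable (Spec_select_sheet_py sheets out) := by unfold Spec_select_sheet_py; infer_instance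

-- ===== CLAIM (what is proved, stated in full; the proofs are below) =====
def Claim_equal_select_sheet_py : Prop := ∀ (sheets : List String), Dom_select_sheet_py sheets → Spec_select_sheet_py sheets (select_sheet_py sheets)

-- ===== LEMMAS AND PROOFS =====

-- the value of the remaining minimization given the current best tier bt and best sheet bs
def pvR (l : List String) (bt : Int) (bs : String) : String :=
  if bt = 0 then bs
  else if bt = 1 then (l.find? pvCondA).getD bs
  else (l.find? pvCondA).getD ((l.find? pvCondB).getD bs)

lemma pvTier_eq (s : String) : pvTier s = if pvCondA s then 0 else if pvCondB s then 1 else 2 := by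
  unfold pvTier pvCondA pvCondB
  cases PySem.Str.isIn "accessory" (PySem.Str.lower s) <;>
    cases PySem.Str.isIn "pricing" (PySem.Str.lower s) <;>
    cases PySem.Str.isIn "sku" (PySem.Str.lower s) <;> simp

lemma pvTier_cases (s : String) : pvTier s = 0 ∨ pvTier s = 1 ∨ pvTier s = 2 := by
  rw [pvTier_eq]; split_ifs <;> simp

lemma pvR_cons (s : String) (l : List String) (bt : Int) (bs : String)
    (hbt : bt = 0 ∨ bt = 1 ∨ bt = 2) :
    pvR (s :: l) bt bs = if pvTier s < bt then pvR l (pvTier s) s else pvR l bt bs := by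
  rw [pvTier_eq]
  cases hA : pvCondA s <;> cases hB : pvCondB s <;>
    rcases hbt with h | h | h <;> subst h <;>
    simp [pvR, hA, hB]

lemma pvFold_char (l : List String) : ∀ (i bt bi : Int) (bs : String), bi < i →
    (bt = 0 ∨ bt = 1 ∨ bt = 2) →
    ((PySem.List.enumerate l i).foldl pvStep (bt, bi, bs)).2.2 = pvR l bt bs := by
  induction l with
  | nil =>
    intro i bt bi bs _ _
    simp [PySem.List.enumerate_nil, pvR]
  | cons s rest ih =>
    intro i bt bi bs hbi hbt
    rw [PySem.List.enumerate_cons, List.foldl_cons]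
    have hstep : pvStep (bt, bi, bs) (i, s)
        = if pvTier s < bt then (pvTier s, i, s) else (bt, bi, bs) := by
      simp only [pvStep]
      have : ¬ (i < bi) := by omega
      by_cases h : pvTier s < bt <;> simp [h, this]
    rw [hstep, pvR_cons s rest bt bs hbt]
    by_cases h : pvTier s < bt
    · simp only [h, if_true]
      exact ih (i + 1) (pvTier s) i s (by omega) (pvTier_cases s)
    · simp only [h, if_false]
      exact ih (i + 1) bt bi bs (by omega) hbt

-- ===== VERDICT (by name: the statement is the Claim_ definition above) =====
theorem select_sheet_py_spec : Claim_equal_select_sheet_py := by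
  intro sheets _
  show select_sheet_py sheets = select_sheet_py_alt sheets
  cases sheets with
  | nil => rfl
  | cons s rest =>
    have hA : select_sheet_py (s :: rest) = pvR (s :: rest) 2 s := by
      unfold select_sheet_py pvR
      simp only [show (2:Int) ≠ 0 by decide, show (2:Int) ≠ 1 by decide, if_false]
      cases (s :: rest).find? pvCondA <;> cases (s :: rest).find? pvCondB <;> simp
    have hB : select_sheet_py_alt (s :: rest) = pvR rest (pvTier s) s := by
      unfold select_sheet_py_alt
      exact pvFold_char rest 1 (pvTier s) 0 s (by omega) (pvTier_cases s)
    rw [hA, hB, pvR_cons s rest 2 s (by simp)]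
    rcases pvTier_cases s with h | h | h <;> rw [h] <;> norm_num
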